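-- pv_equiv track=rewrite | github.com/mikemcqueen/polyalpha | wordgen.py | get_prefix_start_idx
-- ===== SOURCE A (Python) =====
-- def get_prefix_start_idx(prefix, wordlist):
--     # Find first potential match using binary search
--     left, right = 0, len(wordlist) - 1
--     while left <= right:
--         mid = (left + right) // 2
--         if wordlist[mid] < prefix:
--             left = mid + 1
--         else:
--             right = mid - 1
--     return left
-- ===== SOURCE B (Python) =====
-- def get_prefix_start_idx(prefix, wordlist):
--     # Linear forward scan: leftmost index whose word is >= prefix (sorted wordlist).
--     for i, w in enumerate(wordlist):
--         if w >= prefix: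
--             return i
--     return len(wordlist)
-- ===== Notes on version B (the rewrite author's own statement) =====
-- stated objective: simpler
-- what changed: Replaced the hand-written binary search with a single linear forward scan that returns the first index whose word is >= prefix (or len(wordlist)).
-- outside the precondition, e.g. on get_prefix_start_idx('b', ['z', 'a', 'z']): A returns 2, B returns 0
import Mathlib
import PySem

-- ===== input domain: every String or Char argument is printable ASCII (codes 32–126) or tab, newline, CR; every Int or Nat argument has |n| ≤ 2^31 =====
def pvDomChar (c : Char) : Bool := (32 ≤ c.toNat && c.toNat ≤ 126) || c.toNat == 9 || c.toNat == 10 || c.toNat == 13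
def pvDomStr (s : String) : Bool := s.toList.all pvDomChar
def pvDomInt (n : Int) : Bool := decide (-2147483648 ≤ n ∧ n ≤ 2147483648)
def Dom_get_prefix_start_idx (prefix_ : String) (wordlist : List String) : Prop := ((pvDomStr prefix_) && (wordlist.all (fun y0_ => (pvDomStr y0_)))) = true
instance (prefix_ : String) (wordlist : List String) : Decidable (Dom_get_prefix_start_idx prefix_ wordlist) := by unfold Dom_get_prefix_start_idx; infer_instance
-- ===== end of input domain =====

-- B replaces A's binary search by a single linear forward scan (simpler, not faster);
-- equivalence is claimed on sorted wordlists (Pre_).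

-- ===== PORT A =====
-- the while-loop of A; wordlist[mid] is always in range (0 ≤ left ≤ mid ≤ right ≤ len-1),
-- so the '.getD ""' default is never reached
def pvWhileA (prefix_ : String) (wordlist : List String) (left right : Int) : Int :=
  if h : left ≤ right then
    let mid := PySem.Int.floordiv (left + right) 2
    if PySem.List.pyGetD wordlist mid "" < prefix_ then
      pvWhileA prefix_ wordlist (mid + 1) right
    else
      pvWhileA prefix_ wordlist left (mid - 1)
  else left
termination_by (right + 1 - left).toNat
decreasing_by
  · have hb := PySem.Int.floordiv_two_mid_bounds h; omega
  · have hb := PySem.Int.floordiv_two_mid_bounds h; omega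

def get_prefix_start_idx (prefix_ : String) (wordlist : List String) : Int :=
  pvWhileA prefix_ wordlist 0 ((wordlist.length : Int) - 1)

-- ===== PORT B =====
-- the for-loop of B: i is the enumerate counter; returns i at the first w ≥ prefix, else len
def pvScanB (prefix_ : String) : List String → Int → Int
  | [], i => i
  | w :: ws, i => if prefix_ ≤ w then i else pvScanB prefix_ ws (i + 1)

def get_prefix_start_idx_alt (prefix_ : String) (wordlist : List String) : Int :=
  pvScanB prefix_ wordlist 0

-- ===== PRECONDITION & SPEC =====
-- Pre_ excludes wordlists not partitioned by the prefix (some word ≥ prefix occurring before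
-- a word < prefix — impossible in the documented sorted wordlist), on which the landing index
-- of A's binary search is an accident of its probe order.
def Pre_get_prefix_start_idx (prefix_ : String) (wordlist : List String) : Prop :=
  List.Pairwise (fun a b => prefix_.toList ≤ a.toList → prefix_.toList ≤ b.toList) wordlist
instance (prefix_ : String) (wordlist : List String) : Decidable (Pre_get_prefix_start_idx prefix_ wordlist) := by unfold Pre_get_prefix_start_idx; infer_instance

def pvWitness_get_prefix_start_idx : String × List String := ("b", ["a", "b", "c"])

def Spec_get_prefix_start_idx (prefix_ : String) (wordlist : List String) (out : Int) : Prop := out = get_prefix_start_idx_alt prefix_ wordlist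
instance (prefix_ : String) (wordlist : List String) (out : Int) : Decidable (Spec_get_prefix_start_idx prefix_ wordlist out) := by unfold Spec_get_prefix_start_idx; infer_instance

-- ===== CLAIM (what is proved, stated in full; the proofs are below) =====
def Claim_equal_get_prefix_start_idx : Prop := ∀ (prefix_ : String) (wordlist : List String), Dom_get_prefix_start_idx prefix_ wordlist → Pre_get_prefix_start_idx prefix_ wordlist → Spec_get_prefix_start_idx prefix_ wordlist (get_prefix_start_idx prefix_ wordlist)

-- ===== LEMMAS AND PROOFS =====

-- B's scan computes start-index + findIdx of the first word ≥ prefix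
lemma pvScanB_eq (prefix_ : String) (l : List String) (i : Int) :
    pvScanB prefix_ l i = i + ((l.findIdx (fun w => decide (prefix_ ≤ w)) : Nat) : Int) := by
  induction l generalizing i with
  | nil => simp [pvScanB]
  | cons w ws ih =>
    by_cases h : prefix_ ≤ w
    · simp only [pvScanB, if_pos h, List.findIdx_cons, decide_eq_true h, cond_true,
        Nat.cast_zero, add_zero]
    · simp only [pvScanB, if_neg h, List.findIdx_cons, decide_eq_false h, cond_false, ih]
      push_cast; ring

-- A's loop invariant: everything left of `left` is < prefix, everything right of `right` is ≥ prefix;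
-- on a sorted list the loop lands exactly on the findIdx of the first word ≥ prefix.
lemma pvWhileA_eq (prefix_ : String) (wl : List String)
    (hs : List.Pairwise (fun a b => prefix_.toList ≤ a.toList → prefix_.toList ≤ b.toList) wl) (left right : Int)
    (h0 : 0 ≤ left) (h1 : right < (wl.length : Int)) (h2 : left ≤ right + 1)
    (hl : ∀ (i : Nat) (hi : i < wl.length), (i : Int) < left → wl[i] < prefix_)
    (hr : ∀ (i : Nat) (hi : i < wl.length), right < (i : Int) → prefix_ ≤ wl[i]) :
    pvWhileA prefix_ wl left right = ((wl.findIdx (fun w => decide (prefix_ ≤ w)) : Nat) : Int) := by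
  have hpair : ∀ (i j : Nat) (hi : i < wl.length) (hj : j < wl.length), i < j →
      prefix_ ≤ wl[i] → prefix_ ≤ wl[j] :=
    fun i j hi hj hij hp => String.le_iff_toList_le.mpr
      (List.pairwise_iff_getElem.mp hs i j hi hj hij (String.le_iff_toList_le.mp hp))
  revert h0 h1 h2 hl hr
  fun_induction pvWhileA prefix_ wl left right with
  | case1 left right h mid hlt ih =>
    intro h0 h1 h2 hl hr
    have hb := PySem.Int.floordiv_two_mid_bounds h
    have hmidlen : mid.toNat < wl.length := by omega
    have hget : PySem.List.pyGetD wl mid "" = wl[mid.toNat] := by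
      rw [PySem.List.pyGetD_of_nonneg wl "" (by omega : (0:Int) ≤ mid)]
      exact List.getD_eq_getElem wl "" hmidlen
    rw [hget] at hlt
    apply ih
    · omega
    · omega
    · omega
    · intro i hi hilt
      rcases lt_or_eq_of_le (by omega : i ≤ mid.toNat) with hcase | hcase
      · by_contra hnlt
        exact absurd (hpair i mid.toNat hi hmidlen hcase (le_of_not_gt hnlt))
          (not_le_of_gt hlt)
      · subst hcase; exact hlt
    · exact hr
  | case2 left right h mid hlt ih =>
    intro h0 h1 h2 hl hr
    have hb := PySem.Int.floordiv_two_mid_bounds h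
    have hmidlen : mid.toNat < wl.length := by omega
    have hget : PySem.List.pyGetD wl mid "" = wl[mid.toNat] := by
      rw [PySem.List.pyGetD_of_nonneg wl "" (by omega : (0:Int) ≤ mid)]
      exact List.getD_eq_getElem wl "" hmidlen
    rw [hget] at hlt
    have hge : prefix_ ≤ wl[mid.toNat] := le_of_not_gt hlt
    apply ih
    · omega
    · omega
    · omega
    · exact hl
    · intro i hi hilt
      rcases lt_or_eq_of_le (by omega : mid.toNat ≤ i) with hcase | hcase
      · exact hpair mid.toNat i hmidlen hi hcase hge
      · subst hcase; exact hge
  | case3 left right h =>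
    intro h0 h1 h2 hl hr
    -- loop finished: left = right + 1
    have hlr : left = right + 1 := by omega
    set k := wl.findIdx (fun w => decide (prefix_ ≤ w)) with hk
    have hkle : k ≤ wl.length := List.findIdx_le_length
    have hlen : left ≤ (wl.length : Int) := by omega
    by_contra hne
    rcases lt_trichotomy left ((k : Nat) : Int) with hc | hc | hc
    · -- left < k : wl[left] satisfies the predicate but is below findIdx
      have hlnat : left.toNat < k := by omega
      have hllen : left.toNat < wl.length := by omega
      have hp : prefix_ ≤ wl[left.toNat] := hr left.toNat hllen (by omega)
      have := List.not_of_lt_findIdx (p := fun w => decide (prefix_ ≤ w)) (xs := wl) hlnat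
      simp only [decide_eq_false_iff_not] at this
      exact this hp
    · exact hne hc
    · -- k < left : wl[k] < prefix but findIdx says the predicate holds there
      have hklen : k < wl.length := by omega
      have hlt : wl[k] < prefix_ := hl k hklen (by omega)
      have hp := List.findIdx_getElem (p := fun w => decide (prefix_ ≤ w)) (xs := wl) (w := hklen)
      simp only [decide_eq_true_eq] at hp
      exact absurd hp (not_le_of_gt hlt)

-- ===== VERDICT (by name: the statement is the Claim_ definition above) =====
theorem get_prefix_start_idx_spec : Claim_equal_get_prefix_start_idx := by
  intro prefix_ wordlist _hdom hpre
  unfold Spec_get_prefix_start_idx get_prefix_start_idx get_prefix_start_idx_alt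
  rw [pvScanB_eq, pvWhileA_eq prefix_ wordlist hpre 0 ((wordlist.length : Int) - 1)
      (by omega) (by omega) (by omega)
      (by intro i hi hilt; omega)
      (by intro i hi hilt; omega)]
  ring
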